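-- pv_equiv track=rewrite | github.com/mattcallaway/CampaignInABox | engine/swing_modeling/backtester.py | _years_needed
-- ===== SOURCE A (Python) =====
-- def _years_needed(available: list, min_training: int) -> list:
--     """Suggest additional years that would enable stronger validation."""
--     last = max(available) if available else 2020
--     needed = []
--     if len(available) < min_training + 2:
--         for y in range(last + 2, last + 8, 2):
--             needed.append(y)
--             if len(available) + len(needed) >= min_training + 2:
--                 break
--     return needed
-- ===== SOURCE B (Python) =====
-- def _years_needed(available: list, min_training: int) -> list:
--     """Suggest additional years that would enable stronger validation."""
--     last = max(available) if available else 2020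
--     candidates = [last + 2, last + 4, last + 6]
--
--     def take(cands, deficit):
--         if deficit <= 0 or not cands:
--             return []
--         return [cands[0]] + take(cands[1:], deficit - 1)
--
--     return take(candidates, min_training + 2 - len(available))
-- ===== Notes on version B (the rewrite author's own statement) =====
-- stated objective: alternative
-- what changed: Replaces the range loop with break by materialising the three candidate years up front and recursively taking from them while a deficit counter (min_training+2-len(available)) is positive.
import Mathlib
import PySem

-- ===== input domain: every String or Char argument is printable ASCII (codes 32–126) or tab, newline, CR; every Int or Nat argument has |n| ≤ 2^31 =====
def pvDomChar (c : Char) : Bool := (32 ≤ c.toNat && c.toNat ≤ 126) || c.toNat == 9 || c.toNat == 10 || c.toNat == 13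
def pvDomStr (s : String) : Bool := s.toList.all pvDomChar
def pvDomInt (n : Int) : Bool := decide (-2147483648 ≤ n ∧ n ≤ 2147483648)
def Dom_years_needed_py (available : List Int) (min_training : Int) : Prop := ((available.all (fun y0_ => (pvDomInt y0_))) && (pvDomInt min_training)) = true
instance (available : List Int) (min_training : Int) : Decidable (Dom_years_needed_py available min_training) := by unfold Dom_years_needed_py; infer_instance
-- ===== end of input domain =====

-- B materialises the three candidate years up front and recursively takes from them while a deficit counter is positive; objective: alternative.

-- ===== PORT A =====
-- the 'for y in range(...): needed.append(y); if ...: break' loop, transcribed as recursion over the range list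
def pvYLoopA (availLen min_training : Int) : List Int → List Int → List Int
  | [], needed => needed
  | y :: ys, needed =>
    let needed' := needed ++ [y]
    if availLen + (needed'.length : Int) ≥ min_training + 2 then needed'
    else pvYLoopA availLen min_training ys needed'

def years_needed_py (available : List Int) (min_training : Int) : List Int :=
  let last : Int := if available ≠ [] then (PySem.List.max? available (fun y => y)).getD 2020 else 2020
  if (available.length : Int) < min_training + 2 then
    pvYLoopA (available.length : Int) min_training (PySem.List.pyRange (last + 2) (last + 8) 2) []
  else []

-- ===== PORT B =====
-- Source B's inner 'take': consume the candidate list while the deficit is positive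
def pvTakeB : List Int → Int → List Int
  | [], _ => []
  | c :: cs, d => if d ≤ 0 then [] else c :: pvTakeB cs (d - 1)

def years_needed_py_alt (available : List Int) (min_training : Int) : List Int :=
  let last : Int := if available ≠ [] then (PySem.List.max? available (fun y => y)).getD 2020 else 2020
  pvTakeB [last + 2, last + 4, last + 6] (min_training + 2 - (available.length : Int))

-- ===== PRECONDITION & SPEC =====
def Spec_years_needed_py (available : List Int) (min_training : Int) (out : List Int) : Prop := out = years_needed_py_alt available min_training
instance (available : List Int) (min_training : Int) (out : List Int) : Decidable (Spec_years_needed_py available min_training out) := by unfold Spec_years_needed_py; infer_instance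

-- ===== CLAIM (what is proved, stated in full; the proofs are below) =====
def Claim_equal_years_needed_py : Prop := ∀ (available : List Int) (min_training : Int), Dom_years_needed_py available min_training → Spec_years_needed_py available min_training (years_needed_py available min_training)

-- ===== LEMMAS AND PROOFS =====

-- range(last+2, last+8, 2) is the three years last+2, last+4, last+6
theorem pvRange_step2 (a : Int) : PySem.List.pyRange (a + 2) (a + 8) 2 = [a + 2, a + 4, a + 6] := by
  rw [PySem.List.pyRange_of_pos (a + 2) (a + 8) (show (0:Int) < 2 by norm_num)]
  rw [if_pos (by omega : a + 2 < a + 8)]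
  have h8 : (((a + 8) - (a + 2) + 2 - 1) / 2 : Int) = 3 := by omega
  rw [h8]
  simp [List.range_succ]
  constructor <;> omega

theorem years_needed_py_eq (available : List Int) (min_training : Int) :
    years_needed_py available min_training = years_needed_py_alt available min_training := by
  unfold years_needed_py years_needed_py_alt
  dsimp only
  generalize (if available ≠ [] then (PySem.List.max? available (fun y => y)).getD 2020 else 2020) = last
  generalize hLdef : (available.length : Int) = L
  have hL0 : 0 ≤ L := by omega
  rw [pvRange_step2]
  by_cases hlt : L < min_training + 2
  · rw [if_pos hlt]
    simp only [pvYLoopA, pvTakeB, List.nil_append, List.length_cons, List.length_nil,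
      List.length_append]
    split_ifs with h1 h2 h3 <;> simp_all <;> omega
  · rw [if_neg hlt]
    simp only [pvTakeB]
    rw [if_pos (by omega : min_training + 2 - L ≤ 0)]

-- ===== VERDICT (by name: the statement is the Claim_ definition above) =====
theorem years_needed_py_spec : Claim_equal_years_needed_py := by
  intro available min_training _hdom
  exact years_needed_py_eq available min_training
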